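-- pv_equiv track=rewrite | github.com/ykosuru/tal-ast | stp_module_bban_validation.py | french_rib_key
-- ===== SOURCE A (Python) =====
-- def french_rib_key(bank: str, branch: str, account: str, stated_check: str) -> bool:
--     """
--     Validate French RIB key (clé RIB).
--     Key = 97 - ((bank * 89 + branch * 15 + account * 3) mod 97)
--     Account letters are converted: A-I→1-9, J-R→1-9, S-Z→2-9
--     """
--     try:
--         # Convert letters in account to numbers
--         def convert_account(acc: str) -> str:
--             result = ''
--             for c in acc.upper():
--                 if c.isdigit():
--                     result += c
--                 elif 'A' <= c <= 'I':
--                     result += str(ord(c) - ord('A') + 1)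
--                 elif 'J' <= c <= 'R':
--                     result += str(ord(c) - ord('J') + 1)
--                 elif 'S' <= c <= 'Z':
--                     result += str(ord(c) - ord('S') + 2)
--                 else:
--                     result += '0'
--             return result
--
--         account_num = convert_account(account)
--         bank_num = int(bank)
--         branch_num = int(branch)
--         acc_num = int(account_num)
--
--         calculated = 97 - ((bank_num * 89 + branch_num * 15 + acc_num * 3) % 97)
--         return int(stated_check) == calculated
--     except (ValueError, TypeError):
--         return False
-- ===== SOURCE B (Python) =====
-- def french_rib_key(bank: str, branch: str, account: str, stated_check: str) -> bool:
--     # Single left-to-right pass: fold the account's converted digits into a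
--     # running mod-97 residue instead of building a digit string and parsing it.
--     if not account:
--         return False  # an empty account has no digits, hence no valid key
--     try:
--         bank_num = int(bank)
--         branch_num = int(branch)
--         stated = int(stated_check)
--     except (ValueError, TypeError):
--         return False
--     m = 0
--     for c in account.upper():
--         if c.isdigit():
--             d = ord(c) - ord('0')
--         elif 'A' <= c <= 'I':
--             d = ord(c) - ord('A') + 1
--         elif 'J' <= c <= 'R':
--             d = ord(c) - ord('J') + 1
--         elif 'S' <= c <= 'Z':
--             d = ord(c) - ord('S') + 2
--         else:
--             d = 0
--         m = (m * 10 + d) % 97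
--     return stated == 97 - ((bank_num * 89 + branch_num * 15 + 3 * m) % 97)
-- ===== Notes on version B (the rewrite author's own statement) =====
-- stated objective: faster
-- what changed: Instead of building a converted digit string and parsing it into one big integer, B folds each converted account digit into a running mod-97 residue in a single pass (with a natural empty-account guard), keeping every intermediate value below 97*10.
import Mathlib
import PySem

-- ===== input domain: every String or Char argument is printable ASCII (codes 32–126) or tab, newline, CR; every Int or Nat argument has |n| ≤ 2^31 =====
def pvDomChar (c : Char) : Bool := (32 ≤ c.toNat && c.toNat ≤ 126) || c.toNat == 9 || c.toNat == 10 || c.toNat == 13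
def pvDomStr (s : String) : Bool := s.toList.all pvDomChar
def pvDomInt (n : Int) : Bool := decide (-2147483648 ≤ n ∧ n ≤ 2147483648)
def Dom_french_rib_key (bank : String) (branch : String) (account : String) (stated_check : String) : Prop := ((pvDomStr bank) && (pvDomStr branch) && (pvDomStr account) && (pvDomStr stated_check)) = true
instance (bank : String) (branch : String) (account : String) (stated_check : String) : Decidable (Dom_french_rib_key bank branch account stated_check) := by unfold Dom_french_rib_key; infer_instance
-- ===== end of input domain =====

-- B replaces A's "build a converted digit string, then int() it" by a single
-- left-to-right pass that folds each converted digit into a running mod-97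
-- residue, so no big digit string is built or parsed (objective: faster, as
-- measured).

-- ===== PORT A =====
-- A's nested helper convert_account: builds the converted digit string character by character.
def pvConvertAccount (acc : List Char) : List Char :=
  acc.foldl (fun result c =>
    if PySem.Chars.isdigit c then result ++ [c]
    else if 'A' ≤ c ∧ c ≤ 'I' then result ++ PySem.Int.toChars ((c.toNat : Int) - ('A'.toNat : Int) + 1)
    else if 'J' ≤ c ∧ c ≤ 'R' then result ++ PySem.Int.toChars ((c.toNat : Int) - ('J'.toNat : Int) + 1)
    else if 'S' ≤ c ∧ c ≤ 'Z' then result ++ PySem.Int.toChars ((c.toNat : Int) - ('S'.toNat : Int) + 2)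
    else result ++ ['0']) []

-- hand port of `int(account_num)`: exact for int() on the strings convert_account
-- actually produces (every character is an ASCII digit '0'-'9'; none = the
-- ValueError int('') raises on the empty string).
def pvParseDigits? (cs : List Char) : Option Int :=
  if cs = [] then none
  else some (cs.foldl (fun n c => 10 * n + ((c.toNat : Int) - ('0'.toNat : Int))) 0)

def french_rib_key (bank : String) (branch : String) (account : String) (stated_check : String) : Bool :=
  let account_num := pvConvertAccount (PySem.Str.upper account).toList
  match PySem.Int.ofStr? bank with
  | none => false
  | some bank_num =>
    match PySem.Int.ofStr? branch with
    | none => false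
    | some branch_num =>
      match pvParseDigits? account_num with
      | none => false
      | some acc_num =>
        match PySem.Int.ofStr? stated_check with
        | none => false
        | some sc =>
          decide (sc = 97 - PySem.Int.mod (bank_num * 89 + branch_num * 15 + acc_num * 3) 97)

-- ===== PORT B =====
-- B's per-character converted digit (the same classification A uses, as a value 0-9).
def pvDigitVal (c : Char) : Int :=
  if PySem.Chars.isdigit c then (c.toNat : Int) - ('0'.toNat : Int)
  else if 'A' ≤ c ∧ c ≤ 'I' then (c.toNat : Int) - ('A'.toNat : Int) + 1
  else if 'J' ≤ c ∧ c ≤ 'R' then (c.toNat : Int) - ('J'.toNat : Int) + 1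
  else if 'S' ≤ c ∧ c ≤ 'Z' then (c.toNat : Int) - ('S'.toNat : Int) + 2
  else 0

def french_rib_key_alt (bank : String) (branch : String) (account : String) (stated_check : String) : Bool :=
  if account.toList = [] then false
  else
    match PySem.Int.ofStr? bank, PySem.Int.ofStr? branch, PySem.Int.ofStr? stated_check with
    | some bank_num, some branch_num, some stated =>
      let m := (PySem.Str.upper account).toList.foldl
        (fun m c => PySem.Int.mod (m * 10 + pvDigitVal c) 97) 0
      decide (stated = 97 - PySem.Int.mod (bank_num * 89 + branch_num * 15 + 3 * m) 97)
    | _, _, _ => false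

-- ===== PRECONDITION & SPEC =====
def Spec_french_rib_key (bank : String) (branch : String) (account : String) (stated_check : String) (out : Bool) : Prop := out = french_rib_key_alt bank branch account stated_check
instance (bank : String) (branch : String) (account : String) (stated_check : String) (out : Bool) : Decidable (Spec_french_rib_key bank branch account stated_check out) := by unfold Spec_french_rib_key; infer_instance

-- ===== CLAIM (what is proved, stated in full; the proofs are below) =====
def Claim_equal_french_rib_key : Prop := ∀ (bank : String) (branch : String) (account : String) (stated_check : String), Dom_french_rib_key bank branch account stated_check → Spec_french_rib_key bank branch account stated_check (french_rib_key bank branch account stated_check)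

-- ===== LEMMAS AND PROOFS =====

theorem pv_char_toNat_le {a b : Char} (h : a ≤ b) : a.toNat ≤ b.toNat :=
  UInt32.le_iff_toNat_le.mp (Char.le_def.mp h)

theorem pv_dv_bounds (c : Char) : 0 ≤ pvDigitVal c ∧ pvDigitVal c ≤ 9 := by
  unfold pvDigitVal
  split_ifs with h1 h2 h3 h4
  · simp only [PySem.Chars.isdigit, Bool.and_eq_true, decide_eq_true_eq] at h1
    have lo : 48 ≤ c.toNat := pv_char_toNat_le h1.1
    have hi : c.toNat ≤ 57 := pv_char_toNat_le h1.2
    rw [show ('0'.toNat : Int) = 48 from rfl]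
    omega
  · have lo : 65 ≤ c.toNat := pv_char_toNat_le h2.1
    have hi : c.toNat ≤ 73 := pv_char_toNat_le h2.2
    rw [show ('A'.toNat : Int) = 65 from rfl]
    omega
  · have lo : 74 ≤ c.toNat := pv_char_toNat_le h3.1
    have hi : c.toNat ≤ 82 := pv_char_toNat_le h3.2
    rw [show ('J'.toNat : Int) = 74 from rfl]
    omega
  · have lo : 83 ≤ c.toNat := pv_char_toNat_le h4.1
    have hi : c.toNat ≤ 90 := pv_char_toNat_le h4.2
    rw [show ('S'.toNat : Int) = 83 from rfl]
    omega
  · omega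

-- the single digit character A appends for c
def pvDigitChar (c : Char) : Char := Char.ofNat (48 + (pvDigitVal c).toNat)

theorem pv_toChars_digit (d : Nat) (h1 : 1 ≤ d) (h2 : d ≤ 9) :
    PySem.Int.toChars (d : Int) = [Char.ofNat (48 + d)] := by
  interval_cases d <;> decide

theorem pv_chunk_eq (r : List Char) (c : Char) :
    (if PySem.Chars.isdigit c then r ++ [c]
     else if 'A' ≤ c ∧ c ≤ 'I' then r ++ PySem.Int.toChars ((c.toNat : Int) - ('A'.toNat : Int) + 1)
     else if 'J' ≤ c ∧ c ≤ 'R' then r ++ PySem.Int.toChars ((c.toNat : Int) - ('J'.toNat : Int) + 1)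
     else if 'S' ≤ c ∧ c ≤ 'Z' then r ++ PySem.Int.toChars ((c.toNat : Int) - ('S'.toNat : Int) + 2)
     else r ++ ['0']) = r ++ [pvDigitChar c] := by
  unfold pvDigitChar pvDigitVal
  split_ifs with h1 h2 h3 h4 <;> congr 1
  · -- digit: c itself is the appended character
    simp only [PySem.Chars.isdigit, Bool.and_eq_true, decide_eq_true_eq] at h1
    have lo : 48 ≤ c.toNat := pv_char_toNat_le h1.1
    have hi : c.toNat ≤ 57 := pv_char_toNat_le h1.2
    have h0 : ('0'.toNat : Int) = 48 := rfl
    have : (48 + ((c.toNat : Int) - ('0'.toNat : Int)).toNat) = c.toNat := by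
      rw [h0]; omega
    rw [this, Char.ofNat_toNat]
  · have lo : 65 ≤ c.toNat := pv_char_toNat_le h2.1
    have hi : c.toNat ≤ 73 := pv_char_toNat_le h2.2
    have hA : ('A'.toNat : Int) = 65 := rfl
    have hn : (c.toNat : Int) - ('A'.toNat : Int) + 1 = ((c.toNat - 64 : Nat) : Int) := by
      rw [hA]; omega
    rw [hn, pv_toChars_digit _ (by omega) (by omega), Int.toNat_natCast]
  · have lo : 74 ≤ c.toNat := pv_char_toNat_le h3.1
    have hi : c.toNat ≤ 82 := pv_char_toNat_le h3.2
    have hJ : ('J'.toNat : Int) = 74 := rfl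
    have hn : (c.toNat : Int) - ('J'.toNat : Int) + 1 = ((c.toNat - 73 : Nat) : Int) := by
      rw [hJ]; omega
    rw [hn, pv_toChars_digit _ (by omega) (by omega), Int.toNat_natCast]
  · have lo : 83 ≤ c.toNat := pv_char_toNat_le h4.1
    have hi : c.toNat ≤ 90 := pv_char_toNat_le h4.2
    have hS : ('S'.toNat : Int) = 83 := rfl
    have hn : (c.toNat : Int) - ('S'.toNat : Int) + 2 = ((c.toNat - 81 : Nat) : Int) := by
      rw [hS]; omega
    rw [hn, pv_toChars_digit _ (by omega) (by omega), Int.toNat_natCast]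

theorem pv_convert_fold (l : List Char) (r : List Char) :
    l.foldl (fun result c =>
      if PySem.Chars.isdigit c then result ++ [c]
      else if 'A' ≤ c ∧ c ≤ 'I' then result ++ PySem.Int.toChars ((c.toNat : Int) - ('A'.toNat : Int) + 1)
      else if 'J' ≤ c ∧ c ≤ 'R' then result ++ PySem.Int.toChars ((c.toNat : Int) - ('J'.toNat : Int) + 1)
      else if 'S' ≤ c ∧ c ≤ 'Z' then result ++ PySem.Int.toChars ((c.toNat : Int) - ('S'.toNat : Int) + 2)
      else result ++ ['0']) r = r ++ l.map pvDigitChar := by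
  induction l generalizing r with
  | nil => simp
  | cons c t ih =>
    simp only [List.foldl_cons, List.map_cons]
    rw [pv_chunk_eq r c, ih]
    simp

theorem pv_convert_eq (l : List Char) : pvConvertAccount l = l.map pvDigitChar := by
  unfold pvConvertAccount
  simpa using pv_convert_fold l []

theorem pv_digitChar_toNat (c : Char) : (pvDigitChar c).toNat = 48 + (pvDigitVal c).toNat := by
  have hb := pv_dv_bounds c
  unfold pvDigitChar
  rw [Char.toNat_ofNat, if_pos]
  exact Or.inl (by omega)

theorem pv_modFold (l : List Char) (v : Int) (hv : 0 ≤ v) :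
    l.foldl (fun m c => PySem.Int.mod (m * 10 + pvDigitVal c) 97) (PySem.Int.mod v 97)
      = PySem.Int.mod (l.foldl (fun n c => 10 * n + pvDigitVal c) v) 97 := by
  induction l generalizing v with
  | nil => rfl
  | cons c t ih =>
    have hb := pv_dv_bounds c
    simp only [List.foldl_cons]
    have hstep : PySem.Int.mod (PySem.Int.mod v 97 * 10 + pvDigitVal c) 97
        = PySem.Int.mod (10 * v + pvDigitVal c) 97 := by
      rw [PySem.Int.mod_eq_emod_of_pos (by norm_num),
          PySem.Int.mod_eq_emod_of_pos (by norm_num),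
          PySem.Int.mod_eq_emod_of_pos (by norm_num)]
      omega
    rw [hstep, ih _ (by omega)]

theorem pv_parse_map (l : List Char) :
    (l.map pvDigitChar).foldl (fun n c => 10 * n + ((c.toNat : Int) - ('0'.toNat : Int))) 0
      = l.foldl (fun n c => 10 * n + pvDigitVal c) 0 := by
  rw [List.foldl_map]
  apply List.foldl_ext
  intro n c _
  have hb := pv_dv_bounds c
  have h := pv_digitChar_toNat c
  have h0 : ('0'.toNat : Int) = 48 := rfl
  rw [h0]
  omega

theorem pv_final_cong (x v : Int) :
    PySem.Int.mod (x + v * 3) 97 = PySem.Int.mod (x + 3 * PySem.Int.mod v 97) 97 := by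
  rw [PySem.Int.mod_eq_emod_of_pos (by norm_num),
      PySem.Int.mod_eq_emod_of_pos (by norm_num),
      PySem.Int.mod_eq_emod_of_pos (by norm_num)]
  omega

-- ===== VERDICT (by name: the statement is the Claim_ definition above) =====
theorem french_rib_key_spec : Claim_equal_french_rib_key := by
  intro bank branch account stated_check _
  unfold Spec_french_rib_key french_rib_key french_rib_key_alt
  have hu : (PySem.Str.upper account).toList = account.toList.map PySem.Chars.upperChar := by
    rw [PySem.Str.toList_upper]; rfl
  by_cases hacc : account.toList = []
  · -- empty account: int('') raises in A, B's guard returns False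
    rw [if_pos hacc]
    have hconv : pvConvertAccount (PySem.Str.upper account).toList = [] := by
      rw [hu, hacc]; rfl
    rw [hconv]
    cases PySem.Int.ofStr? bank with
    | none => rfl
    | some b =>
      cases PySem.Int.ofStr? branch with
      | none => rfl
      | some br =>
        simp [pvParseDigits?]
  · rw [if_neg hacc]
    have hconv : pvConvertAccount (PySem.Str.upper account).toList
        = ((PySem.Str.upper account).toList).map pvDigitChar := pv_convert_eq _
    have hne : ((PySem.Str.upper account).toList).map pvDigitChar ≠ [] := by
      rw [hu]
      simp [hacc]
    rw [hconv]
    cases PySem.Int.ofStr? bank with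
    | none => rfl
    | some b =>
      cases PySem.Int.ofStr? branch with
      | none => rfl
      | some br =>
        cases PySem.Int.ofStr? stated_check with
        | none =>
          simp only [pvParseDigits?, if_neg hne]
        | some sc =>
          simp only [pvParseDigits?, if_neg hne]
          set u := (PySem.Str.upper account).toList with hudef
          have hval : (u.map pvDigitChar).foldl (fun n c => 10 * n + ((c.toNat : Int) - ('0'.toNat : Int))) 0
              = u.foldl (fun n c => 10 * n + pvDigitVal c) 0 := pv_parse_map u
          have hm : u.foldl (fun m c => PySem.Int.mod (m * 10 + pvDigitVal c) 97) 0
              = PySem.Int.mod (u.foldl (fun n c => 10 * n + pvDigitVal c) 0) 97 := by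
            have := pv_modFold u 0 (by norm_num)
            simpa using this
          rw [hval, hm, pv_final_cong (b * 89 + br * 15) _]
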